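-- pv_equiv track=rewrite | github.com/TheorieLearn/TheorieLearn | serverFilesCourse/theorielearn/CFGs/grade.py | _tokenize_alt
-- ===== SOURCE A (Python) =====
-- _EPSILON_KEYWORDS = {"e", "eps", "epsilon", "ε"}
--
-- class NT(str):
--     __slots__ = ()
--
-- def _tokenize_alt(text):
--     """
--     Tokenize one RHS alternative into a list of NT/str symbols,
--     or return None to indicate epsilon.
--     """
--     stripped = text.strip()
--     if not stripped or stripped.lower() in _EPSILON_KEYWORDS:
--         return None  # epsilon
--
--     rhs = []
--     i = 0
--     while i < len(stripped):
--         c = stripped[i]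
--         if c in " \t":
--             i += 1
--         elif c.isupper():
--             # Nonterminal: uppercase letter followed by lowercase letters, digits, or underscore.
--             # An uppercase letter always starts a NEW nonterminal, so "SS" → S, S and "AB" → A, B.
--             j = i + 1
--             while j < len(stripped) and (stripped[j].islower() or stripped[j] == "_"):
--                 j += 1
--             rhs.append(NT(stripped[i:j]))
--             i = j
--         elif c.isdigit():
--             rhs.append(c)  # plain str terminal
--             i += 1
--         elif c.islower():
--             # Lowercase run → terminal characters (e.g. "ban", "ill", "ini")
--             # Note: a standalone alternative of just "e"/"eps"/"epsilon" is
--             # already handled above as epsilon before we reach this loop.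
--             j = i + 1
--             while j < len(stripped) and stripped[j].islower():
--                 j += 1
--             for ch in stripped[i:j]:
--                 rhs.append(ch)
--             i = j
--         elif c in ("'", '"'):
--             end = stripped.index(c, i + 1)
--             for ch in stripped[i + 1 : end]:
--                 rhs.append(ch)
--             i = end + 1
--         else:
--             raise ValueError(
--                 f"Unexpected character {c!r} in alternative {text!r}. "
--                 "Nonterminals must start with an uppercase letter; "
--                 "terminals are lowercase letters or digits; use 'e' for epsilon."
--             )
--     return rhs
-- ===== SOURCE B (Python) =====
-- _EPSILON_KEYWORDS = {"e", "eps", "epsilon", "ε"}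
--
-- class NT(str):
--     __slots__ = ()
--
-- def _tokenize_alt(text):
--     """
--     Tokenize one RHS alternative into a list of NT/str symbols,
--     or return None to indicate epsilon.
--     Single left-to-right pass with a state machine (open-quote char +
--     pending nonterminal buffer) instead of index arithmetic with inner scans.
--     """
--     stripped = text.strip()
--     if not stripped or stripped.lower() in _EPSILON_KEYWORDS:
--         return None  # epsilon
--
--     out = []
--     quote = None    # currently open quote character, or None
--     pending = None  # nonterminal currently being accumulated, or None
--
--     def flush():
--         nonlocal pending
--         if pending is not None:
--             out.append(NT(pending))
--             pending = None
--
--     for c in stripped: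
--         if quote is not None:
--             if c == quote:
--                 quote = None
--             else:
--                 out.append(c)
--         elif c.isupper():
--             flush()
--             pending = c
--         elif pending is not None and (c.islower() or c == "_"):
--             pending += c
--         elif c.islower():
--             out.append(c)
--         elif c.isdigit():
--             flush()
--             out.append(c)
--         elif c in " \t":
--             flush()
--         elif c in ("'", '"'):
--             flush()
--             quote = c
--         else:
--             raise ValueError(
--                 f"Unexpected character {c!r} in alternative {text!r}. "
--                 "Nonterminals must start with an uppercase letter; "
--                 "terminals are lowercase letters or digits; use 'e' for epsilon."
--             )
--     if quote is not None:
--         raise ValueError(f"Unterminated quote in alternative {text!r}.")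
--     flush()
--     return out
-- ===== Notes on version B (the rewrite author's own statement) =====
-- stated objective: faster
-- what changed: Replaces A's index-based scanner (outer while over positions with inner while-loops for nonterminal/lowercase runs, slicing, and str.index for quotes) by a single character-at-a-time pass over the stripped text driven by an explicit state machine (currently-open quote char + pending nonterminal buffer).
import Mathlib
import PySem

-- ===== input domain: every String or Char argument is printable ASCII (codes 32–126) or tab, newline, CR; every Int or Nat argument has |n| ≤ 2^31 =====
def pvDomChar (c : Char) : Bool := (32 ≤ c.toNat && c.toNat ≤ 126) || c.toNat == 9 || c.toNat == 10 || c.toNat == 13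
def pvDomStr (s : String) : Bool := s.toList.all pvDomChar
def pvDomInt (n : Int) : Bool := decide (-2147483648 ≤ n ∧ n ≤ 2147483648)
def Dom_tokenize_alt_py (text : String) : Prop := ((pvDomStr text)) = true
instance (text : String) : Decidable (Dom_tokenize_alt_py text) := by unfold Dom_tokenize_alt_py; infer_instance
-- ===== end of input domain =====

-- B replaces A's index-based scanner (inner while-loops and slicing) by one
-- character-at-a-time pass with an explicit state machine (open-quote char +
-- pending-nonterminal buffer); a timing run measured B faster by a constant factor.
-- Where Python A raises ValueError the ports return `none`; those inputs are
-- excluded by Pre_tokenize_alt_py, so `none` from the ports inside Pre_ means epsilon.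

-- ===== PORT A =====

-- inner `while j < len(stripped) and (stripped[j].islower() or stripped[j] == "_")`
def pvScanNT (s : List Char) (j : Nat) : Nat :=
  if h : j < s.length then
    if PySem.Chars.islower (s[j]'h) || (s[j]'h) == '_' then pvScanNT s (j + 1) else j
  else j
termination_by s.length - j

-- inner `while j < len(stripped) and stripped[j].islower()`
def pvScanLow (s : List Char) (j : Nat) : Nat :=
  if h : j < s.length then
    if PySem.Chars.islower (s[j]'h) then pvScanLow s (j + 1) else j
  else j
termination_by s.length - j

-- the `while i < len(stripped)` loop; fuel ≥ len(stripped) - i only makes it total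
def pvALoop (s : List Char) : Nat → Nat → List String → Option (List String)
  | 0, _, acc => some acc
  | fuel + 1, i, acc =>
    if h : i < s.length then
      let c := s[i]'h
      if c = ' ' || c = '\t' then pvALoop s fuel (i + 1) acc
      else if PySem.Chars.isupper c then
        let j := pvScanNT s (i + 1)
        pvALoop s fuel j (acc ++ [String.ofList ((s.drop i).take (j - i))])
      else if PySem.Chars.isdigit c then
        pvALoop s fuel (i + 1) (acc ++ [String.ofList [c]])
      else if PySem.Chars.islower c then
        let j := pvScanLow s (i + 1)
        pvALoop s fuel j (acc ++ ((s.drop i).take (j - i)).map fun ch => String.ofList [ch])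
      else if c = '\'' || c = '"' then
        let e := PySem.Chars.findFrom s [c] ((i : Int) + 1) none
        if e = -1 then none  -- str.index raises ValueError
        else pvALoop s fuel (e.toNat + 1)
          (acc ++ ((s.drop (i + 1)).take (e.toNat - (i + 1))).map fun ch => String.ofList [ch])
      else none  -- raise ValueError (unexpected character)
    else some acc

def pvEpsilonKeywords : List (List Char) := ["e".toList, "eps".toList, "epsilon".toList, "ε".toList]

def tokenize_alt_py (text : String) : Option (List String) :=
  let stripped := PySem.Chars.strip text.toList
  if stripped = [] || pvEpsilonKeywords.contains (PySem.Chars.lower stripped) then none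
  else pvALoop stripped stripped.length 0 []

-- ===== PORT B =====

-- state: none = ValueError; some (quote, pending, out)
def pvBSt : Type := Option (Option Char × Option (List Char) × List String)

def pvFlush (pend : Option (List Char)) (out : List String) : List String :=
  match pend with
  | none => out
  | some p => out ++ [String.ofList p]

def pvStepB (st : pvBSt) (c : Char) : pvBSt :=
  match st with
  | none => none
  | some (some q, pend, out) =>
    if c = q then some (none, pend, out) else some (some q, pend, out ++ [String.ofList [c]])
  | some (none, pend, out) =>
    if PySem.Chars.isupper c then some (none, some [c], pvFlush pend out)
    else if pend.isSome && (PySem.Chars.islower c || c == '_') then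
      some (none, some (pend.getD [] ++ [c]), out)
    else if PySem.Chars.islower c then some (none, pend, out ++ [String.ofList [c]])
    else if PySem.Chars.isdigit c then some (none, none, pvFlush pend out ++ [String.ofList [c]])
    else if c = ' ' || c = '\t' then some (none, none, pvFlush pend out)
    else if c = '\'' || c = '"' then some (some c, none, pvFlush pend out)
    else none  -- raise ValueError (unexpected character)

def pvFinB (st : pvBSt) : Option (List String) :=
  match st with
  | none => none                       -- ValueError propagated
  | some (some _, _, _) => none        -- unterminated quote: ValueError
  | some (none, pend, out) => some (pvFlush pend out)

def tokenize_alt_py_alt (text : String) : Option (List String) :=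
  let stripped := PySem.Chars.strip text.toList
  if stripped = [] || pvEpsilonKeywords.contains (PySem.Chars.lower stripped) then none
  else pvFinB (stripped.foldl pvStepB (some (none, none, [])))

-- ===== PRECONDITION & SPEC =====

-- Pre_ excludes exactly the inputs on which Python A raises ValueError (an
-- unexpected character outside quotes, or an unterminated quote); it is a
-- 3-state automaton acceptance condition on the stripped text, independent of
-- either port.
inductive pvPreState : Type
  | top : pvPreState
  | nt : pvPreState
  | quo : Char → pvPreState
deriving DecidableEq

def pvPreStep (st : Option pvPreState) (c : Char) : Option pvPreState :=
  match st with
  | none => none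
  | some (.quo q) => if c = q then some .top else some (.quo q)
  | some .top =>
    if PySem.Chars.isupper c then some .nt
    else if PySem.Chars.islower c || PySem.Chars.isdigit c || c = ' ' || c = '\t' then some .top
    else if c = '\'' || c = '"' then some (.quo c)
    else none
  | some .nt =>
    if PySem.Chars.isupper c then some .nt
    else if PySem.Chars.islower c || c = '_' then some .nt
    else if PySem.Chars.isdigit c || c = ' ' || c = '\t' then some .top
    else if c = '\'' || c = '"' then some (.quo c)
    else none

def pvPreAccept (st : Option pvPreState) : Bool :=
  match st with
  | some .top => true
  | some .nt => true
  | _ => false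

def Pre_tokenize_alt_py (text : String) : Prop :=
  let stripped := PySem.Chars.strip text.toList
  stripped = [] ∨ pvEpsilonKeywords.contains (PySem.Chars.lower stripped) = true ∨
    pvPreAccept (stripped.foldl pvPreStep (some .top)) = true

instance (text : String) : Decidable (Pre_tokenize_alt_py text) := by
  unfold Pre_tokenize_alt_py; infer_instance

def pvWitness_tokenize_alt_py : String := "S a S b"

def Spec_tokenize_alt_py (text : String) (out : Option (List String)) : Prop := out = tokenize_alt_py_alt text
instance (text : String) (out : Option (List String)) : Decidable (Spec_tokenize_alt_py text out) := by unfold Spec_tokenize_alt_py; infer_instance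

-- ===== CLAIM (what is proved, stated in full; the proofs are below) =====
def Claim_equal_tokenize_alt_py : Prop := ∀ (text : String), Dom_tokenize_alt_py text → Pre_tokenize_alt_py text → Spec_tokenize_alt_py text (tokenize_alt_py text)

-- ===== LEMMAS AND PROOFS =====

-- char-class disjointness on which the branch orders agree
theorem pv_lower_not_upper {c : Char} (h : PySem.Chars.islower c = true) : PySem.Chars.isupper c = false := by
  simp [PySem.Chars.islower, PySem.Chars.isupper] at *
  simp [Char.le_def, Char.lt_def, UInt32.le_iff_toNat_le, UInt32.lt_iff_toNat_lt] at *
  omega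

theorem pv_digit_excl {c : Char} (h : PySem.Chars.isdigit c = true) :
    PySem.Chars.isupper c = false ∧ PySem.Chars.islower c = false ∧ c ≠ '_' := by
  simp [PySem.Chars.islower, PySem.Chars.isupper, PySem.Chars.isdigit, Char.ext_iff] at *
  simp [Char.le_def, Char.lt_def, UInt32.le_iff_toNat_le, UInt32.lt_iff_toNat_lt, UInt32.ext_iff] at *
  omega

theorem pv_lower_excl {c : Char} (h : PySem.Chars.islower c = true) :
    PySem.Chars.isupper c = false ∧ PySem.Chars.isdigit c = false ∧ c ≠ '_' := by
  simp [PySem.Chars.islower, PySem.Chars.isupper, PySem.Chars.isdigit, Char.ext_iff] at *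
  simp [Char.le_def, Char.lt_def, UInt32.le_iff_toNat_le, UInt32.lt_iff_toNat_lt, UInt32.ext_iff] at *
  omega

theorem pv_nt_not_upper {d : Char} (h : (PySem.Chars.islower d || d == '_') = true) :
    PySem.Chars.isupper d = false := by
  rcases Bool.or_eq_true_iff.mp h with h' | h'
  · exact pv_lower_not_upper h'
  · have : d = '_' := by simpa using h'
    subst this; decide

-- characterization of the two inner scans as takeWhile lengths
theorem pv_scanNT_eq (s : List Char) (j : Nat) :
    pvScanNT s j = j + ((s.drop j).takeWhile (fun d => PySem.Chars.islower d || d == '_')).length := by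
  fun_induction pvScanNT s j with
  | case1 j h hp ih =>
    rw [List.drop_eq_getElem_cons h, List.takeWhile_cons, if_pos hp, ih]
    simp; omega
  | case2 j h hp =>
    rw [List.drop_eq_getElem_cons h, List.takeWhile_cons, if_neg hp]
    simp
  | case3 j h =>
    rw [List.drop_eq_nil_of_le (by omega)]
    simp

theorem pv_scanLow_eq (s : List Char) (j : Nat) :
    pvScanLow s j = j + ((s.drop j).takeWhile (fun d => PySem.Chars.islower d)).length := by
  fun_induction pvScanLow s j with
  | case1 j h hp ih =>
    rw [List.drop_eq_getElem_cons h, List.takeWhile_cons, if_pos hp, ih]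
    simp; omega
  | case2 j h hp =>
    rw [List.drop_eq_getElem_cons h, List.takeWhile_cons, if_neg hp]
    simp
  | case3 j h =>
    rw [List.drop_eq_nil_of_le (by omega)]
    simp

-- a run of lowercase/underscore characters extends the pending nonterminal
theorem pv_foldl_nt_run (l : List Char) (p : List Char) (out : List String)
    (hl : ∀ d ∈ l, (PySem.Chars.islower d || d == '_') = true) :
    l.foldl pvStepB (some (none, some p, out)) = some (none, some (p ++ l), out) := by
  induction l generalizing p with
  | nil => simp
  | cons d l ih =>
    have hd := hl d (by simp)
    simp only [List.foldl_cons, pvStepB, pv_nt_not_upper hd, Bool.false_eq_true, if_false,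
      Option.isSome_some, Bool.true_and, hd, if_pos, Option.getD_some]
    rw [ih _ (fun d hd => hl d (by simp [hd]))]
    simp

-- a run of lowercase characters with no pending nonterminal emits single-char terminals
theorem pv_foldl_low_run (l : List Char) (out : List String)
    (hl : ∀ d ∈ l, PySem.Chars.islower d = true) :
    l.foldl pvStepB (some (none, none, out)) =
      some (none, none, out ++ l.map fun ch => String.ofList [ch]) := by
  induction l generalizing out with
  | nil => simp
  | cons d l ih =>
    have hd := hl d (by simp)
    simp only [List.foldl_cons, pvStepB, pv_lower_not_upper hd, Bool.false_eq_true, if_false,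
      Option.isSome_none, Bool.false_and, hd, if_pos]
    rw [ih _ (fun d hd => hl d (by simp [hd]))]
    simp

-- characters other than the open quote are emitted verbatim inside a quote
theorem pv_foldl_quote_run (l : List Char) (q : Char) (pend : Option (List Char)) (out : List String)
    (hl : ∀ d ∈ l, d ≠ q) :
    l.foldl pvStepB (some (some q, pend, out)) =
      some (some q, pend, out ++ l.map fun ch => String.ofList [ch]) := by
  induction l generalizing out with
  | nil => simp
  | cons d l ih =>
    have hd := hl d (by simp)
    simp only [List.foldl_cons, pvStepB, hd, if_false]
    rw [ih _ (fun d hd => hl d (by simp [hd]))]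
    simp

theorem pv_dropWhile_head_false {p : Char → Bool} {l xs : List Char} {x : Char}
    (h : l.dropWhile p = x :: xs) : p x = false := by
  have hne : l.dropWhile p ≠ [] := by simp [h]
  have h2 := List.head_dropWhile_not p hne
  have h3 : (l.dropWhile p).head hne = x := by simp [h]
  rw [h3] at h2
  exact h2

theorem pv_foldl_none (l : List Char) : l.foldl pvStepB none = none := by
  induction l with
  | nil => rfl
  | cons d l ih => simpa [pvStepB] using ih

theorem pv_key (s : List Char) (fuel i : Nat) (pend : Option (List Char)) (out : List String)
    (hfuel : s.length ≤ i + fuel)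
    (hpend : pend = none ∨ (∀ h : i < s.length,
      ¬(PySem.Chars.islower (s[i]'h) = true ∨ (s[i]'h) = '_'))) :
    pvALoop s fuel i (pvFlush pend out) =
      pvFinB ((s.drop i).foldl pvStepB (some (none, pend, out))) := by
  induction fuel generalizing i pend out with
  | zero =>
    rw [List.drop_eq_nil_of_le (by omega)]
    simp [pvALoop, pvFinB]
  | succ fuel ih =>
    rw [pvALoop]
    by_cases h : i < s.length
    case neg =>
      rw [List.drop_eq_nil_of_le (by omega)]
      simp [h, pvFinB]
    case pos =>
    rw [dif_pos h]
    simp only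
    by_cases hsp : ((s[i]'h) = ' ' || (s[i]'h) = '\t') = true
    case pos =>
      rw [if_pos hsp]
      rw [List.drop_eq_getElem_cons h, List.foldl_cons]
      have hstep : pvStepB (some (none, pend, out)) (s[i]'h) = some (none, none, pvFlush pend out) := by
        rcases (by simpa using hsp : (s[i]'h) = ' ' ∨ (s[i]'h) = '\t') with h' | h' <;>
          rw [pvStepB, h'] <;> simp [PySem.Chars.isupper, PySem.Chars.islower, PySem.Chars.isdigit, Char.le_def]
      rw [hstep]
      have := ih (i + 1) none (pvFlush pend out) (by omega) (Or.inl rfl)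
      simpa [pvFlush] using this
    case neg =>
    rw [if_neg hsp]
    by_cases hup : PySem.Chars.isupper (s[i]'h) = true
    case pos =>
      rw [if_pos hup]
      -- characterize the nonterminal scan
      set T := (List.drop (i+1) s).takeWhile (fun d => PySem.Chars.islower d || d == '_') with hT
      set R := (List.drop (i+1) s).dropWhile (fun d => PySem.Chars.islower d || d == '_') with hR
      have hTR : List.drop (i+1) s = T ++ R := (List.takeWhile_append_dropWhile).symm
      have hj : pvScanNT s (i+1) = i + 1 + T.length := by rw [pv_scanNT_eq]
      have hpre : T <+: List.drop (i+1) s := by rw [hT]; exact List.takeWhile_prefix _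
      have hjle : i + 1 + T.length ≤ s.length := by
        have := hpre.length_le
        simp only [List.length_drop] at this
        omega
      -- A's slice is the uppercase letter followed by the scanned run
      have hchunk : (List.drop i s).take (pvScanNT s (i+1) - i) = (s[i]'h) :: T := by
        rw [hj, List.drop_eq_getElem_cons h]
        have : i + 1 + T.length - i = T.length + 1 := by omega
        rw [this, List.take_succ_cons]
        congr 1
        exact (List.prefix_iff_eq_take.mp hpre).symm
      -- B's fold consumes the same characters into the pending buffer
      have hdropj : List.drop (i + 1 + T.length) s = R := by
        rw [← List.drop_drop, hTR, List.drop_left]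
      have hstep : pvStepB (some (none, pend, out)) (s[i]'h) =
          some (none, some [s[i]'h], pvFlush pend out) := by
        rw [pvStepB, if_pos hup]
      have hrun := pv_foldl_nt_run T [s[i]'h] (pvFlush pend out)
        (by intro d hd; rw [hT] at hd
            exact List.mem_takeWhile_imp (p := fun d => PySem.Chars.islower d || d == '_') hd)
      have hpend' : ∀ h' : i + 1 + T.length < s.length,
          ¬(PySem.Chars.islower (s[i + 1 + T.length]'h') = true ∨ (s[i + 1 + T.length]'h') = '_') := by
        intro h'
        have hcons : List.dropWhile (fun d => PySem.Chars.islower d || d == '_')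
            (List.drop (i + 1) s) = (s[i + 1 + T.length]'h') :: List.drop (i + 1 + T.length + 1) s := by
          rw [← hR, ← hdropj]
          exact List.drop_eq_getElem_cons h'
        have := pv_dropWhile_head_false hcons
        simpa using this
      have hih := ih (i + 1 + T.length) (some ((s[i]'h) :: T)) (pvFlush pend out)
        (by omega) (Or.inr hpend')
      rw [hchunk, hj, List.drop_eq_getElem_cons h, List.foldl_cons, hstep, hTR,
        List.foldl_append, hrun, ← hdropj]
      simpa [pvFlush] using hih
    case neg =>
    rw [if_neg hup]
    by_cases hdig : PySem.Chars.isdigit (s[i]'h) = true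
    case pos =>
      rw [if_pos hdig]
      obtain ⟨hd1, hd2, hd3⟩ := pv_digit_excl hdig
      have hstep : pvStepB (some (none, pend, out)) (s[i]'h) =
          some (none, none, pvFlush pend out ++ [String.ofList [s[i]'h]]) := by
        rw [pvStepB]
        simp [hd1, hd2, hd3, hdig]
      rw [List.drop_eq_getElem_cons h, List.foldl_cons, hstep]
      have := ih (i + 1) none (pvFlush pend out ++ [String.ofList [s[i]'h]]) (by omega) (Or.inl rfl)
      simpa [pvFlush] using this
    case neg =>
    rw [if_neg hdig]
    by_cases hlow : PySem.Chars.islower (s[i]'h) = true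
    case pos =>
      rw [if_pos hlow]
      obtain ⟨hl1, hl2, hl3⟩ := pv_lower_excl hlow
      -- the pending buffer is empty here: a pending nonterminal ends at a non-lowercase char
      have hpnone : pend = none := by
        rcases hpend with h' | h'
        · exact h'
        · exact absurd (Or.inl hlow) (h' h)
      subst hpnone
      set TL := (List.drop (i+1) s).takeWhile (fun d => PySem.Chars.islower d) with hTL
      set RL := (List.drop (i+1) s).dropWhile (fun d => PySem.Chars.islower d) with hRL
      have hTR : List.drop (i+1) s = TL ++ RL := (List.takeWhile_append_dropWhile).symm
      have hj : pvScanLow s (i+1) = i + 1 + TL.length := by rw [pv_scanLow_eq]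
      have hpre : TL <+: List.drop (i+1) s := by rw [hTL]; exact List.takeWhile_prefix _
      have hjle : i + 1 + TL.length ≤ s.length := by
        have := hpre.length_le
        simp only [List.length_drop] at this
        omega
      have hchunk : (List.drop i s).take (pvScanLow s (i+1) - i) = (s[i]'h) :: TL := by
        rw [hj, List.drop_eq_getElem_cons h]
        have : i + 1 + TL.length - i = TL.length + 1 := by omega
        rw [this, List.take_succ_cons]
        congr 1
        exact (List.prefix_iff_eq_take.mp hpre).symm
      have hdropj : List.drop (i + 1 + TL.length) s = RL := by
        rw [← List.drop_drop, hTR, List.drop_left]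
      have hstep : pvStepB (some (none, none, out)) (s[i]'h) =
          some (none, none, out ++ [String.ofList [s[i]'h]]) := by
        rw [pvStepB]
        simp [hl1, hlow]
      have hrun := pv_foldl_low_run TL (out ++ [String.ofList [s[i]'h]])
        (by intro d hd; rw [hTL] at hd
            exact List.mem_takeWhile_imp (p := fun d => PySem.Chars.islower d) hd)
      have hih := ih (i + 1 + TL.length) none (out ++ [String.ofList [s[i]'h]] ++ TL.map fun ch => String.ofList [ch])
        (by omega) (Or.inl rfl)
      rw [hchunk, hj, List.drop_eq_getElem_cons h, List.foldl_cons, hstep, hTR,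
        List.foldl_append, hrun, ← hdropj]
      simpa [pvFlush] using hih
    case neg =>
    rw [if_neg hlow]
    by_cases hq : ((s[i]'h) = '\'' || (s[i]'h) = '"') = true
    case pos =>
      rw [if_pos hq]
      have hc : (s[i]'h) = '\'' ∨ (s[i]'h) = '"' := by simpa using hq
      have hknat : ((i : Int) + 1) = ((i + 1 : Nat) : Int) := by push_cast; ring
      have hff := PySem.Chars.findFrom_natCast s [s[i]'h] (i + 1) (by omega)
      set f := PySem.Chars.find (List.drop (i + 1) s) [s[i]'h] with hf
      have hstep : pvStepB (some (none, pend, out)) (s[i]'h) =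
          some (some (s[i]'h), none, pvFlush pend out) := by
        rcases hc with h' | h' <;> rw [pvStepB, h'] <;>
          simp [PySem.Chars.isupper, PySem.Chars.islower, PySem.Chars.isdigit, Char.le_def]
      by_cases hfneg : f = -1
      case pos =>
        -- str.index raises ValueError: the quote is unterminated; B also errors out
        rw [hknat, hff, hfneg]
        norm_num
        have hnot : ∀ d ∈ List.drop (i + 1) s, d ≠ (s[i]'h) := by
          intro d hd hdq
          have : [s[i]'h] <:+: List.drop (i + 1) s := by
            subst hdq
            exact (List.singleton_infix_iff _ _).mpr hd
          exact (PySem.Chars.find_eq_neg_one_iff _ _).mp (hf ▸ hfneg) this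
        rw [List.drop_eq_getElem_cons h, List.foldl_cons, hstep,
          pv_foldl_quote_run _ _ _ _ hnot]
        rfl
      case neg =>
      have hf0 : 0 ≤ f := by
        have := PySem.Chars.neg_one_le_find (List.drop (i + 1) s) [s[i]'h]
        rw [← hf] at this
        omega
      obtain ⟨hpref, hmin⟩ := PySem.Chars.find_spec hf0
      set n := f.toNat with hn
      have hnlt : n < (List.drop (i + 1) s).length := by
        rcases hpref with ⟨tl, htl⟩
        have : (List.drop (i + 1) s).drop n ≠ [] := by
          rw [← htl]; simp
        simp only [ne_eq, List.drop_eq_nil_iff] at this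
        omega
      have hlen : i + 1 + n < s.length := by
        simp only [List.length_drop] at hnlt
        omega
      -- e = (i+1) + f, a successful index()
      rw [hknat, hff, if_neg hfneg]
      rw [if_neg (by omega : ¬(((i + 1 : Nat) : Int) + f = -1))]
      have he : (((i + 1 : Nat) : Int) + f).toNat = i + 1 + n := by omega
      set content := (List.drop (i + 1) s).take n with hcont
      obtain ⟨tl, htl⟩ := hpref
      have hdropn : List.drop (i + 1 + n) s = (s[i]'h) :: tl := by
        rw [← List.drop_drop, ← htl]
        rfl
      have htl' : tl = List.drop (i + 1 + n + 1) s := by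
        have := List.drop_eq_getElem_cons hlen
        rw [hdropn] at this
        exact (List.cons.injEq _ _ _ _ ▸ this).2
      have hsplit : List.drop (i + 1) s = content ++ (s[i]'h) :: tl := by
        conv_lhs => rw [← List.take_append_drop n (List.drop (i+1) s)]
        rw [List.drop_drop, hdropn, ← hcont]
      have hnot : ∀ d ∈ content, d ≠ (s[i]'h) := by
        intro d hd hdq
        obtain ⟨t, ht, rfl⟩ := List.getElem_of_mem hd
        have htn : t < n := by
          have := ht
          simp only [hcont, List.length_take] at this
          omega
        have htlen : t < (List.drop (i + 1) s).length := by omega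
        have hget : content[t]'ht = (List.drop (i + 1) s)[t]'htlen := by
          simp [hcont]
        refine hmin t htn ?_
        rw [List.drop_eq_getElem_cons htlen]
        have : (List.drop (i + 1) s)[t]'htlen = (s[i]'h) := by rw [← hget, hdq]
        rw [this]
        exact ⟨_, rfl⟩
      have hstep2 : pvStepB (some (some (s[i]'h), none, pvFlush pend out ++ content.map fun ch => String.ofList [ch])) (s[i]'h) =
          some (none, none, pvFlush pend out ++ content.map fun ch => String.ofList [ch]) := by
        rw [pvStepB, if_pos rfl]
      have hih := ih (i + 1 + n + 1) none
        (pvFlush pend out ++ content.map fun ch => String.ofList [ch]) (by omega) (Or.inl rfl)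
      rw [he, show i + 1 + n - (i + 1) = n from by omega, ← hcont,
        List.drop_eq_getElem_cons h, List.foldl_cons, hstep, hsplit, List.foldl_append,
        pv_foldl_quote_run _ _ _ _ hnot, List.foldl_cons, hstep2, htl']
      simpa [pvFlush] using hih
    case neg =>
    rw [if_neg hq]
    -- unexpected character: A raises ValueError, B errors out as well
    have hstep : pvStepB (some (none, pend, out)) (s[i]'h) = none := by
      rw [pvStepB]
      have hund : pend.isSome = true → (s[i]'h) ≠ '_' := by
        intro hps he
        rcases hpend with rfl | h'
        · simp at hps
        · exact (h' h) (Or.inr he)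
      simp only [Bool.or_eq_true, decide_eq_true_eq, not_or] at hsp hq
      simp [hsp.1, hsp.2, hq.1, hq.2, hup, hdig, hlow]
      exact hund
    rw [List.drop_eq_getElem_cons h, List.foldl_cons, hstep, pv_foldl_none]
    rfl

-- ===== VERDICT (by name: the statement is the Claim_ definition above) =====
theorem tokenize_alt_py_spec : Claim_equal_tokenize_alt_py := by
  intro text _ _
  unfold Spec_tokenize_alt_py tokenize_alt_py tokenize_alt_py_alt
  simp only
  split_ifs with h
  · rfl
  · simpa using pv_key (PySem.Chars.strip text.toList) (PySem.Chars.strip text.toList).length 0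
      none [] (by omega) (Or.inl rfl)
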